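-- pv_equiv track=rewrite | github.com/ascnd1ng/ParserGenerator | src/grammar.py | get_rule_alts
-- ===== SOURCE A (Python) =====
-- def get_rule_alts(out):
--     res = []
--     cur_chain = []
--     for c in out:
--         if c == '|':
--             res.append(cur_chain)
--             cur_chain = []
--         else:
--             cur_chain.append(c)
--     res.append(cur_chain)
--     return res
-- ===== SOURCE B (Python) =====
-- def get_rule_alts(out):
--     # Build the groups back-to-front: one reversed pass collecting reversed
--     # groups, then un-reverse everything.  No (res, cur_chain) accumulator pair.
--     groups = [[]]
--     for c in reversed(list(out)):
--         if c == '|':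
--             groups.append([])
--         else:
--             groups[-1].append(c)
--     return [list(reversed(g)) for g in reversed(groups)]
-- ===== Notes on version B (the rewrite author's own statement) =====
-- stated objective: alternative
-- what changed: Replaces the left-to-right loop with a (res, cur_chain) accumulator pair by a back-to-front build: one reversed pass appending to a list of reversed groups, then un-reversing everything.
import Mathlib
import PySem

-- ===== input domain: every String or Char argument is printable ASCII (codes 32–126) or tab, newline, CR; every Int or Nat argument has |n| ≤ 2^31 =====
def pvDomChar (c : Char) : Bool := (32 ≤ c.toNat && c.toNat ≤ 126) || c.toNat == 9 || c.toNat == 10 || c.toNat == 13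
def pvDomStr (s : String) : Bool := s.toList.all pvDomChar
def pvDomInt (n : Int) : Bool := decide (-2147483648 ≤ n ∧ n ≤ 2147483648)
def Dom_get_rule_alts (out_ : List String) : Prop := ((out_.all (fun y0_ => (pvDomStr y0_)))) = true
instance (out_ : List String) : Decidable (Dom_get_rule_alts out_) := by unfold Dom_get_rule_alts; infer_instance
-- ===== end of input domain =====

-- B replaces A's accumulator loop by a structural recursion building the groups back-to-front; alternative decomposition, same result.
-- ===== PORT A =====
def get_rule_alts (out_ : List String) : List (List String) :=
  let st := out_.foldl (fun (st : List (List String) × List String) c =>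
    if c == "|" then (st.1 ++ [st.2], []) else (st.1, st.2 ++ [c])) ([], [])
  st.1 ++ [st.2]

-- ===== PORT B =====
def get_rule_alts_alt (out_ : List String) : List (List String) :=
  -- reversed pass collecting reversed groups; groups[-1].append(c) becomes
  -- dropLast ++ [last ++ [c]] (groups is never empty, so getLastD's default is never used)
  let groups := (out_.reverse).foldl
    (fun (groups : List (List String)) c =>
      if c == "|" then groups ++ [[]]
      else groups.dropLast ++ [groups.getLastD [] ++ [c]]) [[]]
  (groups.reverse).map (fun g => g.reverse)

-- ===== PRECONDITION & SPEC =====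
def Spec_get_rule_alts (out_ : List String) (out : List (List String)) : Prop := out = get_rule_alts_alt out_
instance (out_ : List String) (out : List (List String)) : Decidable (Spec_get_rule_alts out_ out) := by unfold Spec_get_rule_alts; infer_instance

-- ===== CLAIM (what is proved, stated in full; the proofs are below) =====
def Claim_equal_get_rule_alts : Prop := ∀ (out_ : List String), Dom_get_rule_alts out_ → Spec_get_rule_alts out_ (get_rule_alts out_)

-- ===== LEMMAS AND PROOFS =====

-- ===== VERDICT (by name: the statement is the Claim_ definition above) =====
-- proof-side bridge: the direct structural recursion both ports compute
def pvSplit : List String → List (List String)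
  | [] => [[]]
  | h :: t =>
    match pvSplit t with
    | p :: ps => if h == "|" then [] :: p :: ps else (h :: p) :: ps
    | [] => [[]]  -- unreachable: pvSplit is never empty

lemma pvSplit_ne_nil (l : List String) : pvSplit l ≠ [] := by
  cases l with
  | nil => simp [pvSplit]
  | cons h t =>
    simp only [pvSplit]
    cases pvSplit t with
    | nil => simp
    | cons p ps => by_cases hb : h == "|" <;> simp [hb]

lemma pvA_loop (l : List String) (res : List (List String)) (cur : List String) :
    (let st := l.foldl (fun (st : List (List String) × List String) c =>
      if c == "|" then (st.1 ++ [st.2], []) else (st.1, st.2 ++ [c])) (res, cur)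
     st.1 ++ [st.2]) =
    res ++ (match pvSplit l with
            | p :: ps => (cur ++ p) :: ps
            | [] => [cur]) := by
  induction l generalizing res cur with
  | nil => simp [pvSplit]
  | cons h t ih =>
    simp only [List.foldl_cons, pvSplit]
    by_cases hb : h == "|"
    · simp only [hb, if_pos]
      rw [ih]
      cases hs : pvSplit t with
      | nil => exact absurd hs (pvSplit_ne_nil t)
      | cons p ps => simp
    · simp only [hb, if_neg, Bool.false_eq_true, not_false_iff]
      rw [ih]
      cases hs : pvSplit t with
      | nil => exact absurd hs (pvSplit_ne_nil t)
      | cons p ps => simp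

lemma pvB_key (l : List String) :
    ((List.foldr (fun c (gs : List (List String)) =>
        if c == "|" then gs ++ [[]]
        else gs.dropLast ++ [gs.getLastD [] ++ [c]]) [[]] l).reverse).map
      (fun g => g.reverse) = pvSplit l := by
  induction l with
  | nil => simp [pvSplit]
  | cons h t ih =>
    simp only [List.foldr_cons, pvSplit]
    cases hs : pvSplit t with
    | nil => exact absurd hs (pvSplit_ne_nil t)
    | cons p ps =>
      rw [hs] at ih
      -- recover the shape of the foldr result from ih
      set gs := (List.foldr (fun c (gs : List (List String)) =>
        if c == "|" then gs ++ [[]]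
        else gs.dropLast ++ [gs.getLastD [] ++ [c]]) [[]] t) with hgs
      have hgseq : gs = ((ps.map (fun g => g.reverse)).reverse) ++ [p.reverse] := by
        have : gs.reverse = (p :: ps).map (fun g => g.reverse) := by
          have := congrArg (List.map (fun g : List String => g.reverse)) ih
          simpa [List.map_map, Function.comp] using this
        calc gs = gs.reverse.reverse := by simp
        _ = ((p :: ps).map (fun g => g.reverse)).reverse := by rw [this]
        _ = ((ps.map (fun g => g.reverse)).reverse) ++ [p.reverse] := by simp
      by_cases hb : h == "|"
      · simp [hb, ih]
      · simp only [hb, Bool.false_eq_true, if_neg, not_false_iff]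
        rw [hgseq, List.dropLast_concat, List.getLastD_concat]
        simp [List.map_map]

theorem get_rule_alts_spec : Claim_equal_get_rule_alts := by
  intro out_ _
  unfold Spec_get_rule_alts get_rule_alts get_rule_alts_alt
  have hA := pvA_loop out_ [] []
  simp only [List.nil_append] at hA
  rw [hA]
  rw [List.foldl_reverse]
  have hB := pvB_key out_
  cases hs : pvSplit out_ with
  | nil => exact absurd hs (pvSplit_ne_nil out_)
  | cons p ps =>
    rw [hs] at hB
    simp only [List.map_reverse] at hB ⊢
    rw [hB]
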